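-- pv_equiv track=rewrite | github.com/tati1454/aoc2020 | day04/day04.py | splitPassports
-- ===== SOURCE A (Python) =====
-- def splitPassports(lines):
--     passportsText = []
--
--     passportText = ""
--
--     for line in lines:
--         if line == '\n':
--             passportsText.append(passportText)
--             passportText = ""
--             continue
--
--         passportText += line
--
--     passportsText.append(passportText)
--     return passportsText
-- ===== SOURCE B (Python) =====
-- def splitPassports(lines):
--     passports = []
--     rest = lines
--     while '\n' in rest:
--         i = rest.index('\n')
--         passports.append(''.join(rest[:i]))
--         rest = rest[i + 1:]
--     passports.append(''.join(rest))
--     return passports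
-- ===== Notes on version B (the rewrite author's own statement) =====
-- stated objective: alternative
-- what changed: A builds each block by accumulating a growing string across one pass with a reset on blank lines; B instead repeatedly locates the next blank-line separator with index() and emits ''.join of the slice before it, slicing the rest away.
import Mathlib
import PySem

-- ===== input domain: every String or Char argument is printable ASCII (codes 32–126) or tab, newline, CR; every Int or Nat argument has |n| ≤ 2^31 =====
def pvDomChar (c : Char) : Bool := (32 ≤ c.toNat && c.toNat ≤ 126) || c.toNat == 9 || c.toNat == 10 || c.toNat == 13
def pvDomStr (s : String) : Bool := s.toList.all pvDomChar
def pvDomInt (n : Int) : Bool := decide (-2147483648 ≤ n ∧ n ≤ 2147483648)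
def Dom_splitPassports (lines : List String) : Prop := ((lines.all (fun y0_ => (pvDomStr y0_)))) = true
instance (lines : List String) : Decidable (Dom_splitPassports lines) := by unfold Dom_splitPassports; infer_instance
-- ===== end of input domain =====

-- B replaces A's single accumulating pass by repeatedly locating the next blank line
-- and joining the slice before it (a find-split-point-then-slice decomposition); same cost, no speed claim.

-- ===== PORT A =====
-- the for-loop of A over (lines), state = (acc = passportsText, cur = passportText)
def aLoop (lines : List String) (acc : List String) (cur : String) : List String :=
  match lines with
  | [] => acc ++ [cur]                                   -- after the loop: append cur, return
  | l :: ls =>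
    if l = "\n" then aLoop ls (acc ++ [cur]) ""          -- append cur, reset, continue
    else aLoop ls acc (cur ++ l)                         -- passportText += line

def splitPassports (lines : List String) : List String := aLoop lines [] ""

-- ===== PORT B =====
-- ''.join(parts): concatenation of the parts in order (exact port of str.join with sep = "")
def joinAll (parts : List String) : String :=
  match parts with
  | [] => ""
  | p :: ps => p ++ joinAll ps

-- the while loop of Source B; "'\n' in rest" + "rest.index('\n')" are ported together as
-- PySem.List.index? (first index, none iff not a member — exactly Python's in/index pair);
-- rest[:i] / rest[i+1:] are take/drop, exact here since 0 ≤ i < len(rest).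
def bGo (rest : List String) (passports : List String) : List String :=
  match h : PySem.List.index? rest "\n" with
  | some i => bGo (rest.drop (i + 1)) (passports ++ [joinAll (rest.take i)])
  | none => passports ++ [joinAll rest]
termination_by rest.length
decreasing_by
  have hm : "\n" ∈ rest := (PySem.List.index?_isSome_iff _ _).mp (h ▸ rfl)
  have : 0 < rest.length := List.length_pos_of_mem hm
  simp only [List.length_drop]; omega

def splitPassports_alt (lines : List String) : List String := bGo lines []

-- ===== PRECONDITION & SPEC =====
def Spec_splitPassports (lines : List String) (out : List String) : Prop := out = splitPassports_alt lines
instance (lines : List String) (out : List String) : Decidable (Spec_splitPassports lines out) := by unfold Spec_splitPassports; infer_instance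

-- ===== CLAIM (what is proved, stated in full; the proofs are below) =====
def Claim_equal_splitPassports : Prop := ∀ (lines : List String), Dom_splitPassports lines → Spec_splitPassports lines (splitPassports lines)

-- ===== LEMMAS AND PROOFS =====

/-- prepend to the first block, if any -/
def mapHead (f : String → String) : List String → List String
  | [] => []
  | h :: t => f h :: t

/-- canonical recursive characterisation of the blank-line split -/
def splitRec : List String → List String
  | [] => [""]
  | l :: ls => if l = "\n" then "" :: splitRec ls else mapHead (l ++ ·) (splitRec ls)

theorem splitRec_ne_nil (ls : List String) : splitRec ls ≠ [] := by
  cases ls with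
  | nil => simp [splitRec]
  | cons l ls =>
    simp only [splitRec]
    split
    · simp
    · cases h : splitRec ls with
      | nil => exact absurd h (splitRec_ne_nil ls)
      | cons a t => simp [mapHead]

theorem mapHead_mapHead (f g : String → String) (l : List String) :
    mapHead f (mapHead g l) = mapHead (fun s => f (g s)) l := by
  cases l <;> simp [mapHead]

theorem mapHead_id (l : List String) : mapHead (fun s => "" ++ s) l = l := by
  cases l <;> simp [mapHead]

theorem aLoop_eq (ls : List String) : ∀ acc cur,
    aLoop ls acc cur = acc ++ mapHead (cur ++ ·) (splitRec ls) := by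
  induction ls with
  | nil => intro acc cur; simp [aLoop, splitRec, mapHead]
  | cons l ls ih =>
    intro acc cur
    by_cases h : l = "\n"
    · rw [show aLoop (l :: ls) acc cur = aLoop ls (acc ++ [cur]) "" from by simp [aLoop, h]]
      rw [ih, mapHead_id]
      simp [splitRec, h, mapHead]
    · simp only [aLoop, splitRec, if_neg h, ih, mapHead_mapHead]
      simp [String.append_assoc]

theorem splitRec_no_sep (ls : List String) (h : "\n" ∉ ls) : splitRec ls = [joinAll ls] := by
  induction ls with
  | nil => simp [splitRec, joinAll]
  | cons l ls ih =>
    have hl : l ≠ "\n" := fun e => h (e ▸ List.mem_cons_self ..)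
    have hls : "\n" ∉ ls := fun m => h (List.mem_cons_of_mem _ m)
    simp [splitRec, hl, ih hls, joinAll, mapHead]

theorem splitRec_sep (pre suf : List String) (h : "\n" ∉ pre) :
    splitRec (pre ++ "\n" :: suf) = joinAll pre :: splitRec suf := by
  induction pre with
  | nil => simp [splitRec, joinAll]
  | cons l pre ih =>
    have hl : l ≠ "\n" := fun e => h (e ▸ List.mem_cons_self ..)
    have hp : "\n" ∉ pre := fun m => h (List.mem_cons_of_mem _ m)
    simp [splitRec, hl, ih hp, joinAll, mapHead]

theorem bGo_eq (rest passports : List String) :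
    bGo rest passports = passports ++ splitRec rest := by
  induction rest, passports using bGo.induct with
  | case1 rest passports i h ih =>
    rw [bGo.eq_def]
    split
    case h_2 h' => exact absurd (h' ▸ h) (by simp)
    case h_1 i' h' =>
    obtain rfl : i = i' := Option.some.inj ((h.symm.trans h'))
    obtain ⟨pre, suf, hsplit, hlen, hnm⟩ := (PySem.List.index?_eq_some_iff _ _ _).mp h'
    have htake : rest.take i = pre := by rw [hsplit, ← hlen]; exact List.take_left
    have hdrop : rest.drop (i + 1) = suf := by
      have : rest = (pre ++ ["\n"]) ++ suf := by simp [hsplit]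
      rw [this]
      have : i + 1 = (pre ++ ["\n"]).length := by simp [hlen]
      rw [this]; exact List.drop_left
    rw [ih, hdrop, htake, hsplit, splitRec_sep _ _ hnm]
    simp
  | case2 rest passports h =>
    rw [bGo.eq_def]
    split
    case h_1 i' h' => exact absurd (h' ▸ h) (by simp)
    case h_2 h' =>
    have : "\n" ∉ rest := (PySem.List.index?_eq_none_iff _ _).mp h'
    rw [splitRec_no_sep _ this]

-- ===== VERDICT (by name: the statement is the Claim_ definition above) =====
theorem splitPassports_spec : Claim_equal_splitPassports := by
  intro lines _
  show splitPassports lines = splitPassports_alt lines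
  rw [splitPassports, splitPassports_alt, aLoop_eq, bGo_eq, mapHead_id]
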